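-- pv_equiv track=rewrite | github.com/HimanshuLadva/Python-DSA | Leetcode/daily/202604/23.py | distanceV1
-- ===== SOURCE A (Python) =====
-- from typing import List
--
-- def distanceV1(nums: List[int]) -> List[int]:
--     n = len(nums)
--
--     res = []
--     for i in range(n):
--         temp = 0
--         for j in range(n):
--             if j != i and nums[i] == nums[j]:
--                 temp += abs(i - j)
--
--         res.append(temp)
--     return res
-- ===== SOURCE B (Python) =====
-- from typing import List
--
-- def distanceV1(nums: List[int]) -> List[int]:
--     # One left-to-right pass and one right-to-left pass, each keeping, per value,
--     # a running count and sum of indices seen so far (O(n) instead of O(n^2)).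
--     cnt = {}
--     sm = {}
--     left = []
--     for i, v in enumerate(nums):
--         c = cnt.get(v, 0)
--         t = sm.get(v, 0)
--         left.append(c * i - t)
--         cnt[v] = c + 1
--         sm[v] = t + i
--     cnt = {}
--     sm = {}
--     right = []
--     for i in range(len(nums) - 1, -1, -1):
--         v = nums[i]
--         c = cnt.get(v, 0)
--         t = sm.get(v, 0)
--         right.append(t - c * i)
--         cnt[v] = c + 1
--         sm[v] = t + i
--     right.reverse()
--     return [l + r for l, r in zip(left, right)]
-- ===== Notes on version B (the rewrite author's own statement) =====
-- stated objective: faster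
-- what changed: Replaced A's nested all-pairs scan by two linear sweeps (left-to-right and right-to-left) that keep a per-value running count and index-sum dictionary, computing each entry from prefix/suffix aggregates.
import Mathlib
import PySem

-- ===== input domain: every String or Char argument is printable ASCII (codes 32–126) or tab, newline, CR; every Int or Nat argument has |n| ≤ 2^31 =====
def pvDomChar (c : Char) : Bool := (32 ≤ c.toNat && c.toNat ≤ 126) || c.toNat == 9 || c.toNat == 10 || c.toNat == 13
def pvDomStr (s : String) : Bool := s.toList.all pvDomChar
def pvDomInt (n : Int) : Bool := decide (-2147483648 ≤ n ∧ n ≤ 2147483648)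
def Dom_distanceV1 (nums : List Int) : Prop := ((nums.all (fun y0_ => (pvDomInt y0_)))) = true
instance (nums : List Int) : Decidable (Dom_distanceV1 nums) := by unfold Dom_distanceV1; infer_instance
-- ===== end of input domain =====

-- B replaces A's quadratic all-pairs scan by two linear sweeps keeping per-value running
-- count and index-sum dictionaries (objective: faster, asymptotic O(n^2) → O(n)).

-- ===== PORT A =====
def distanceV1 (nums : List Int) : List Int :=
  let n : Int := PySem.List.len nums
  (PySem.List.pyRange 0 n 1).foldl (fun res i =>
    let temp : Int := (PySem.List.pyRange 0 n 1).foldl (fun temp j =>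
      if j ≠ i ∧ PySem.List.pyGetD nums i 0 = PySem.List.pyGetD nums j 0 then
        temp + |i - j|
      else temp) 0
    res ++ [temp]) []

-- ===== PORT B =====
-- loop body of B's first (left-to-right) sweep: state = (cnt, sm, left), pair = (i, v)
def pvLeftStep (st : PySem.Dict Int Int × PySem.Dict Int Int × List Int) (p : Int × Int) :
    PySem.Dict Int Int × PySem.Dict Int Int × List Int :=
  let c := st.1.getD p.2 0
  let t := st.2.1.getD p.2 0
  (st.1.insert p.2 (c + 1), (st.2.1.insert p.2 (t + p.1), st.2.2 ++ [c * p.1 - t]))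

-- loop body of B's second (right-to-left) sweep: state = (cnt, sm, right), i the index
def pvRightStep (nums : List Int) (st : PySem.Dict Int Int × PySem.Dict Int Int × List Int)
    (i : Int) : PySem.Dict Int Int × PySem.Dict Int Int × List Int :=
  let v := PySem.List.pyGetD nums i 0
  let c := st.1.getD v 0
  let t := st.2.1.getD v 0
  (st.1.insert v (c + 1), (st.2.1.insert v (t + i), st.2.2 ++ [t - c * i]))

def distanceV1_alt (nums : List Int) : List Int :=
  let stL := (PySem.List.enumerate nums 0).foldl pvLeftStep
      (PySem.Dict.empty, PySem.Dict.empty, [])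
  let left := stL.2.2
  let stR := (PySem.List.pyRange (PySem.List.len nums - 1) (-1) (-1)).foldl
      (pvRightStep nums) (PySem.Dict.empty, PySem.Dict.empty, [])
  let right := stR.2.2.reverse
  (left.zip right).map (fun p => p.1 + p.2)

-- ===== PRECONDITION & SPEC =====
def Spec_distanceV1 (nums : List Int) (out : List Int) : Prop := out = distanceV1_alt nums
instance (nums : List Int) (out : List Int) : Decidable (Spec_distanceV1 nums out) := by unfold Spec_distanceV1; infer_instance

-- ===== CLAIM (what is proved, stated in full; the proofs are below) =====
def Claim_equal_distanceV1 : Prop := ∀ (nums : List Int), Dom_distanceV1 nums → Spec_distanceV1 nums (distanceV1 nums)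

-- ===== LEMMAS AND PROOFS =====

-- distance contributed to index k by equal values strictly to its left
def pvLS (nums : List Int) (k : Nat) : Int :=
  ∑ j ∈ Finset.range k, (if nums.getD j 0 = nums.getD k 0 then ((k : Int) - (j : Int)) else 0)
-- distance contributed to index k by equal values strictly to its right
def pvRS (nums : List Int) (k : Nat) : Int :=
  ∑ j ∈ Finset.range nums.length,
    (if k < j ∧ nums.getD j 0 = nums.getD k 0 then ((j : Int) - (k : Int)) else 0)
-- count of value v in xs (as an index sum)
def pvCnt0 (nums : List Int) (v : Int) : Int :=
  ∑ j ∈ Finset.range nums.length, (if nums.getD j 0 = v then (1 : Int) else 0)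
-- sum of the indices holding value v in xs
def pvSm0 (nums : List Int) (v : Int) : Int :=
  ∑ j ∈ Finset.range nums.length, (if nums.getD j 0 = v then (j : Int) else 0)
-- count of indices j ≥ m with nums[j] = v
def pvCntFrom (nums : List Int) (m : Nat) (v : Int) : Int :=
  ∑ j ∈ Finset.range nums.length, (if m ≤ j ∧ nums.getD j 0 = v then (1 : Int) else 0)
-- sum of indices j ≥ m with nums[j] = v
def pvSmFrom (nums : List Int) (m : Nat) (v : Int) : Int :=
  ∑ j ∈ Finset.range nums.length, (if m ≤ j ∧ nums.getD j 0 = v then (j : Int) else 0)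
lemma pv_foldl_ite_add {α : Type} (l : List α) (P : α → Prop) [DecidablePred P]
    (f : α → Int) (a : Int) :
    l.foldl (fun acc x => if P x then acc + f x else acc) a
      = a + (l.map (fun x => if P x then f x else 0)).sum := by
  induction l generalizing a with
  | nil => simp
  | cons x xs ih => by_cases h : P x <;> simp [h, ih, add_assoc]
lemma pv_sum_range_list (f : Nat → Int) (n : Nat) :
    ((List.range n).map f).sum = ∑ j ∈ Finset.range n, f j := by
  induction n with
  | zero => simp
  | succ n ih => simp [List.range_succ, Finset.sum_range_succ, ih]

lemma distanceV1_eq (nums : List Int) :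
    distanceV1 nums = (List.range nums.length).map (fun k => pvLS nums k + pvRS nums k) := by
  unfold distanceV1
  simp only [PySem.List.len_eq]
  rw [PySem.List.pyRange_zero_nat, PySem.List.foldl_append_singleton_eq_map, List.nil_append,
    List.map_map]
  refine List.map_congr_left (fun k hk => ?_)
  rw [List.mem_range] at hk
  show (List.foldl (fun temp j => if j ≠ (k:Int) ∧ _ = _ then temp + _ else temp) 0 _) = _
  rw [pv_foldl_ite_add _ (fun j => j ≠ (k:Int) ∧ PySem.List.pyGetD nums (k:Int) 0 = PySem.List.pyGetD nums j 0)]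
  rw [List.map_map, pv_sum_range_list, zero_add]
  -- now a pure Finset.range sum identity
  have key : ∀ j : Nat, (if (j:Int) ≠ (k:Int) ∧ PySem.List.pyGetD nums (k:Int) 0 = PySem.List.pyGetD nums (j:Int) 0 then |(k:Int) - (j:Int)| else 0)
      = (if j < k ∧ nums.getD j 0 = nums.getD k 0 then ((k:Int) - (j:Int)) else 0)
        + (if k < j ∧ nums.getD j 0 = nums.getD k 0 then ((j:Int) - (k:Int)) else 0) := by
    intro j
    simp only [PySem.List.pyGetD_natCast]
    rcases lt_trichotomy j k with h | h | h
    · have : |(k:Int) - (j:Int)| = (k:Int) - (j:Int) := abs_of_nonneg (by omega)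
      split_ifs with h1 h2 h3 h2 h3 <;> simp_all <;> omega
    · split_ifs <;> simp_all <;> omega
    · have : |(k:Int) - (j:Int)| = (j:Int) - (k:Int) := by rw [abs_sub_comm]; exact abs_of_nonneg (by omega)
      split_ifs with h1 h2 h3 h2 h3 <;> simp_all <;> omega
  calc (∑ j ∈ Finset.range nums.length, ((fun x => if x ≠ (k:Int) ∧ PySem.List.pyGetD nums (k:Int) 0 = PySem.List.pyGetD nums x 0 then |(k:Int) - x| else 0) ∘ (fun j : Nat => (j:Int))) j)
      = ∑ j ∈ Finset.range nums.length,
          ((if j < k ∧ nums.getD j 0 = nums.getD k 0 then ((k:Int) - (j:Int)) else 0)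
           + (if k < j ∧ nums.getD j 0 = nums.getD k 0 then ((j:Int) - (k:Int)) else 0)) := by
        exact Finset.sum_congr rfl (fun j _ => key j)
    _ = pvLS nums k + pvRS nums k := by
        rw [Finset.sum_add_distrib]
        congr 1
        · unfold pvLS
          rw [← Finset.sum_subset (show Finset.range k ⊆ Finset.range nums.length by
            intro x hx; rw [Finset.mem_range] at hx ⊢; omega)
            (fun j _ hj' => by rw [Finset.mem_range, not_lt] at hj'; simp [Nat.not_lt.2 hj'])]
          exact Finset.sum_congr rfl (fun j hj => by
            rw [Finset.mem_range] at hj; simp [hj])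
lemma pv_zip_map_add {α : Type} (l : List α) (f g : α → Int) :
    ((l.map f).zip (l.map g)).map (fun p => p.1 + p.2) = l.map (fun x => f x + g x) := by
  induction l with
  | nil => rfl
  | cons x xs ih => simp [ih]

lemma pv_getD_append (xs : List Int) (x : Int) (j : Nat) (hj : j < xs.length) :
    (xs ++ [x]).getD j 0 = xs.getD j 0 := by
  simp [List.getD_eq_getElem?_getD, List.getElem?_append_left hj]

lemma pv_getD_last (xs : List Int) (x : Int) :
    (xs ++ [x]).getD xs.length 0 = x := by
  simp [List.getD_eq_getElem?_getD]

lemma pvLS_append (xs : List Int) (x : Int) (k : Nat) (hk : k < xs.length) :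
    pvLS (xs ++ [x]) k = pvLS xs k := by
  unfold pvLS
  exact Finset.sum_congr rfl (fun j hj => by
    rw [Finset.mem_range] at hj
    rw [pv_getD_append _ _ _ (by omega), pv_getD_append _ _ _ (by omega)])

lemma pvLS_last (xs : List Int) (x : Int) :
    pvLS (xs ++ [x]) xs.length = pvCnt0 xs x * (xs.length : Int) - pvSm0 xs x := by
  unfold pvLS pvCnt0 pvSm0
  rw [Finset.sum_mul, ← Finset.sum_sub_distrib]
  exact Finset.sum_congr rfl (fun j hj => by
    rw [Finset.mem_range] at hj
    rw [pv_getD_append _ _ _ hj, pv_getD_last]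
    split_ifs <;> ring)

lemma pvCnt0_append (xs : List Int) (x v : Int) :
    pvCnt0 (xs ++ [x]) v = pvCnt0 xs v + (if x = v then 1 else 0) := by
  unfold pvCnt0
  rw [List.length_append, List.length_singleton, Finset.sum_range_succ, pv_getD_last]
  congr 1
  exact Finset.sum_congr rfl (fun j hj => by
    rw [Finset.mem_range] at hj; rw [pv_getD_append _ _ _ hj])

lemma pvSm0_append (xs : List Int) (x v : Int) :
    pvSm0 (xs ++ [x]) v = pvSm0 xs v + (if x = v then (xs.length : Int) else 0) := by
  unfold pvSm0
  rw [List.length_append, List.length_singleton, Finset.sum_range_succ, pv_getD_last]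
  congr 1
  exact Finset.sum_congr rfl (fun j hj => by
    rw [Finset.mem_range] at hj; rw [pv_getD_append _ _ _ hj])

lemma pv_left_inv (xs : List Int) :
    (∀ v, ((PySem.List.enumerate xs 0).foldl pvLeftStep (PySem.Dict.empty, PySem.Dict.empty, [])).1.getD v 0 = pvCnt0 xs v)
    ∧ (∀ v, ((PySem.List.enumerate xs 0).foldl pvLeftStep (PySem.Dict.empty, PySem.Dict.empty, [])).2.1.getD v 0 = pvSm0 xs v)
    ∧ ((PySem.List.enumerate xs 0).foldl pvLeftStep (PySem.Dict.empty, PySem.Dict.empty, [])).2.2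
        = (List.range xs.length).map (pvLS xs) := by
  induction xs using List.reverseRecOn with
  | nil => refine ⟨fun v => ?_, fun v => ?_, ?_⟩ <;> simp [PySem.List.enumerate, pvCnt0, pvSm0]
  | append_singleton xs x ih =>
    obtain ⟨ihc, ihs, iho⟩ := ih
    rw [PySem.List.enumerate_append] at *
    simp only [List.foldl_append] at *
    set st := (PySem.List.enumerate xs 0).foldl pvLeftStep (PySem.Dict.empty, PySem.Dict.empty, []) with hst
    have hstep : List.foldl pvLeftStep st (PySem.List.enumerate [x] (0 + (xs.length:Int)))
        = (st.1.insert x (st.1.getD x 0 + 1),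
           (st.2.1.insert x (st.2.1.getD x 0 + (xs.length:Int)),
            st.2.2 ++ [st.1.getD x 0 * (xs.length:Int) - st.2.1.getD x 0])) := by
      simp [PySem.List.enumerate, pvLeftStep]
    rw [hstep]
    refine ⟨fun v => ?_, fun v => ?_, ?_⟩
    · rw [show (st.1.insert x (st.1.getD x 0 + 1), _).1 = st.1.insert x (st.1.getD x 0 + 1) from rfl]
      rw [PySem.Dict.getD_insert, ihc x, pvCnt0_append]
      by_cases hvx : v = x
      · subst hvx; simp [ihc]
      · simp [hvx, Ne.symm hvx, ihc]
    · rw [show (_, (st.2.1.insert x (st.2.1.getD x 0 + (xs.length:Int)), _)).2.1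
          = st.2.1.insert x (st.2.1.getD x 0 + (xs.length:Int)) from rfl]
      rw [PySem.Dict.getD_insert, ihs x, pvSm0_append]
      by_cases hvx : v = x
      · subst hvx; simp [ihs]
      · simp [hvx, Ne.symm hvx, ihs]
    · rw [show (_, (_, st.2.2 ++ [st.1.getD x 0 * (xs.length:Int) - st.2.1.getD x 0])).2.2
          = st.2.2 ++ [st.1.getD x 0 * (xs.length:Int) - st.2.1.getD x 0] from rfl]
      rw [iho, ihc, ihs, List.length_append, List.length_singleton, List.range_succ, List.map_append]
      congr 1
      · exact (List.map_congr_left (fun k hk => by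
          rw [List.mem_range] at hk; exact (pvLS_append xs x k hk).symm))
      · simp [pvLS_last]
lemma pvCntFrom_pred (nums : List Int) (m : Nat) (hm : m < nums.length) (v : Int) :
    pvCntFrom nums m v = pvCntFrom nums (m + 1) v + (if nums.getD m 0 = v then 1 else 0) := by
  unfold pvCntFrom
  have key : ∀ j ∈ Finset.range nums.length,
      (if m ≤ j ∧ nums.getD j 0 = v then (1:Int) else 0)
        = (if m + 1 ≤ j ∧ nums.getD j 0 = v then (1:Int) else 0)
          + (if j = m then (if nums.getD m 0 = v then (1:Int) else 0) else 0) := by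
    intro j hj
    by_cases hjm : j = m
    · subst hjm; split_ifs <;> simp_all <;> omega
    · split_ifs <;> simp_all <;> omega
  rw [Finset.sum_congr rfl key, Finset.sum_add_distrib,
    Finset.sum_ite_eq' (Finset.range nums.length) m
      (fun _ => if nums.getD m 0 = v then (1:Int) else 0)]
  simp [Finset.mem_range, hm]

lemma pvSmFrom_pred (nums : List Int) (m : Nat) (hm : m < nums.length) (v : Int) :
    pvSmFrom nums m v = pvSmFrom nums (m + 1) v + (if nums.getD m 0 = v then (m:Int) else 0) := by
  unfold pvSmFrom
  have key : ∀ j ∈ Finset.range nums.length,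
      (if m ≤ j ∧ nums.getD j 0 = v then (j:Int) else 0)
        = (if m + 1 ≤ j ∧ nums.getD j 0 = v then (j:Int) else 0)
          + (if j = m then (if nums.getD m 0 = v then (m:Int) else 0) else 0) := by
    intro j hj
    by_cases hjm : j = m
    · subst hjm; split_ifs <;> simp_all <;> omega
    · split_ifs <;> simp_all <;> omega
  rw [Finset.sum_congr rfl key, Finset.sum_add_distrib,
    Finset.sum_ite_eq' (Finset.range nums.length) m
      (fun _ => if nums.getD m 0 = v then (m:Int) else 0)]
  simp [Finset.mem_range, hm]

lemma pvRS_eq (nums : List Int) (m : Nat) (hm : m < nums.length) :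
    pvRS nums m = pvSmFrom nums (m + 1) (nums.getD m 0)
      - pvCntFrom nums (m + 1) (nums.getD m 0) * (m : Int) := by
  unfold pvRS pvCntFrom pvSmFrom
  rw [Finset.sum_mul, ← Finset.sum_sub_distrib]
  simp only [Nat.lt_iff_add_one_le]
  exact Finset.sum_congr rfl (fun j hj => by split_ifs <;> ring)

lemma pvCntFrom_len (nums : List Int) (v : Int) : pvCntFrom nums nums.length v = 0 := by
  unfold pvCntFrom
  exact Finset.sum_eq_zero (fun j hj => by rw [Finset.mem_range] at hj; split_ifs with h <;> omega)

lemma pvSmFrom_len (nums : List Int) (v : Int) : pvSmFrom nums nums.length v = 0 := by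
  unfold pvSmFrom
  exact Finset.sum_eq_zero (fun j hj => by rw [Finset.mem_range] at hj; split_ifs with h <;> omega)

lemma pv_right_inv (nums : List Int) (m : Nat) (hm : m ≤ nums.length)
    (cnt sm : PySem.Dict Int Int) (acc : List Int)
    (hc : ∀ v, cnt.getD v 0 = pvCntFrom nums m v)
    (hs : ∀ v, sm.getD v 0 = pvSmFrom nums m v) :
    ((PySem.List.pyRange ((m : Int) - 1) (-1) (-1)).foldl (pvRightStep nums) (cnt, sm, acc)).2.2
      = acc ++ ((List.range m).map (pvRS nums)).reverse := by
  induction m generalizing cnt sm acc with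
  | zero =>
    rw [PySem.List.pyRange_neg_one_eq_nil (by omega)]
    simp
  | succ m ih =>
    have hcons : PySem.List.pyRange ((((m:Nat)+1 : Nat) : Int) - 1) (-1) (-1)
        = ((m:Nat) : Int) :: PySem.List.pyRange (((m:Nat) : Int) - 1) (-1) (-1) := by
      push_cast
      rw [show ((m:Int) + 1 - 1) = (m:Int) by ring]
      exact PySem.List.pyRange_neg_one_cons (by omega)
    rw [hcons, List.foldl_cons]
    have hmlt : m < nums.length := by omega
    have hv : PySem.List.pyGetD nums ((m:Nat):Int) 0 = nums.getD m 0 := PySem.List.pyGetD_natCast nums m 0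
    have hstep : pvRightStep nums (cnt, sm, acc) ((m:Nat):Int)
        = (cnt.insert (nums.getD m 0) (pvCntFrom nums (m+1) (nums.getD m 0) + 1),
           (sm.insert (nums.getD m 0) (pvSmFrom nums (m+1) (nums.getD m 0) + (m:Int)),
            acc ++ [pvRS nums m])) := by
      simp only [pvRightStep]
      rw [hv, hc, hs, pvRS_eq nums m hmlt]
    rw [hstep]
    rw [ih (by omega) _ _ _
      (fun v => by
        rw [PySem.Dict.getD_insert, pvCntFrom_pred nums m hmlt v]
        by_cases hvx : v = nums.getD m 0
        · subst hvx; simp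
        · rw [if_neg hvx, if_neg (fun h => hvx h.symm), add_zero, hc v])
      (fun v => by
        rw [PySem.Dict.getD_insert, pvSmFrom_pred nums m hmlt v]
        by_cases hvx : v = nums.getD m 0
        · subst hvx; simp
        · rw [if_neg hvx, if_neg (fun h => hvx h.symm), add_zero, hs v])]
    rw [List.range_succ, List.map_append, List.reverse_append]
    simp
lemma distanceV1_alt_eq (nums : List Int) :
    distanceV1_alt nums = (List.range nums.length).map (fun k => pvLS nums k + pvRS nums k) := by
  unfold distanceV1_alt
  simp only [PySem.List.len_eq]
  rw [(pv_left_inv nums).2.2]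
  rw [pv_right_inv nums nums.length le_rfl PySem.Dict.empty PySem.Dict.empty []
    (fun v => by rw [PySem.Dict.getD_empty, pvCntFrom_len])
    (fun v => by rw [PySem.Dict.getD_empty, pvSmFrom_len])]
  rw [List.nil_append, List.reverse_reverse, pv_zip_map_add]

-- ===== VERDICT (by name: the statement is the Claim_ definition above) =====
theorem distanceV1_spec : Claim_equal_distanceV1 := by
  intro nums _
  unfold Spec_distanceV1
  rw [distanceV1_eq, distanceV1_alt_eq]
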